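-- pv_equiv track=rewrite | github.com/yuhui-zh15/model_audit | src/utils/search.py | subgrouping
-- ===== SOURCE A (Python) =====
-- from collections import defaultdict
-- from typing import Dict, List
--
-- def subgrouping(data: List[Dict], fields: List[str]) -> Dict:
--     assert all(field in data[0]["attributes"] for field in fields), "Invalid fields"
--     subgroups = defaultdict(list)
--     for i, x in enumerate(data):
--         subgroups[tuple([(field, x["attributes"][field]) for field in fields])].append(
--             i
--         )
--     return dict(sorted(subgroups.items()))
-- ===== SOURCE B (Python) =====
-- def subgrouping(data, fields):
--     assert all(field in data[0]["attributes"] for field in fields), "Invalid fields"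
--     pairs = [
--         (tuple((f, x["attributes"][f]) for f in fields), i)
--         for i, x in enumerate(data)
--     ]
--     pairs.sort()
--     groups = []
--     for key, i in pairs:
--         if groups and groups[-1][0] == key:
--             groups[-1][1].append(i)
--         else:
--             groups.append((key, [i]))
--     return {k: v for k, v in groups}
-- ===== Notes on version B (the rewrite author's own statement) =====
-- stated objective: alternative
-- what changed: Instead of accumulating a defaultdict of index lists and then sorting its items, B builds the flat (key, index) pair list in one pass, sorts it once (tuple order = key then index), and forms the groups by a single linear run-detection scan over the sorted pairs.
import Mathlib
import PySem

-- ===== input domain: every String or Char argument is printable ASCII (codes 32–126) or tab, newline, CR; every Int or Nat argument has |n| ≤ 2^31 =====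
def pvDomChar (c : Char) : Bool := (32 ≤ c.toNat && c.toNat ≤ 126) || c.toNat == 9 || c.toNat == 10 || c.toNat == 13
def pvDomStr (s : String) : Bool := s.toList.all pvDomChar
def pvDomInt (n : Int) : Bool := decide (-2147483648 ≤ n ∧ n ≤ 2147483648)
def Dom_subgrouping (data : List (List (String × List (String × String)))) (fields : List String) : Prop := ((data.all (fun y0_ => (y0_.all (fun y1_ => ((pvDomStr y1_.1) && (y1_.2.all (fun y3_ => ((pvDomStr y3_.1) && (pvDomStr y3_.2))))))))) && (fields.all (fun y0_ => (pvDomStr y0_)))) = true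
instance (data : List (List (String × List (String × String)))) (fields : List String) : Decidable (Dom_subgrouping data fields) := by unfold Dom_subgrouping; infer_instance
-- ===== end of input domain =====

-- B replaces A's defaultdict-then-sort-items with: build the flat (key, index) pair list,
-- sort it once, and form the groups by a single run-detection scan (alternative decomposition).

-- ===== PORT A =====
-- the key tuple [(field, x["attributes"][field]) for field in fields]; the getD defaults are
-- never read on inputs satisfying Pre_subgrouping (the dict keys are present there).
def pvKey (fields : List String) (x : List (String × List (String × String))) : List (String × String) :=
  fields.map (fun f => (f, (PySem.Dict.mk ((PySem.Dict.mk x).getD "attributes" [])).getD f ""))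

-- Python compares the key tuples ((f1,v1),…,(fk,vk)) lexicographically; on the equal-length key
-- tuples of one call this is exactly lexicographic order of the flattened list [f1,v1,f2,v2,…].
def pvFlat (k : List (String × String)) : List String := k.flatMap (fun q => [q.1, q.2])

def subgrouping (data : List (List (String × List (String × String)))) (fields : List String) : List (List (String × String) × List Int) :=
  let subgroups := (PySem.List.enumerate data 0).foldl
      (fun d p => d.modify (pvKey fields p.2) [] (fun l => l ++ [p.1])) PySem.Dict.empty
  PySem.List.sorted subgroups.items (fun q => pvFlat q.1)

-- ===== PORT B =====
-- the body of Source B's run-detection loop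
def pvGroupStep (groups : List (List (String × String) × List Int)) (q : List (String × String) × Int) : List (List (String × String) × List Int) :=
  match groups with
  | (k, is) :: rest => if k == q.1 then (k, is ++ [q.2]) :: rest else (q.1, [q.2]) :: (k, is) :: rest
  | [] => [(q.1, [q.2])]

-- Source B's `pairs.sort()` compares (key tuple, index) lexicographically: on the equal-length key
-- tuples of one call that is sorted2 with keys (flattened key, index).
def subgrouping_alt (data : List (List (String × List (String × String)))) (fields : List String) : List (List (String × String) × List Int) :=
  let pairs := PySem.List.sorted2
      ((PySem.List.enumerate data 0).map (fun p => (pvKey fields p.2, p.1)))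
      (fun q => pvFlat q.1) (fun q => q.2)
  -- Source B appends a finished group at the end of `groups`; the port conses and reverses.
  (pairs.foldl pvGroupStep []).reverse

-- ===== PRECONDITION & SPEC =====
-- Pre_ excludes exactly the inputs where Python A raises: when fields ≠ [] (with fields = [] the
-- comprehensions never index anything and A always returns), A raises on empty data (IndexError on
-- data[0]), on an element without an "attributes" key (KeyError), and on a field missing from some
-- element's attributes (AssertionError for data[0], KeyError for later elements).
def Pre_subgrouping (data : List (List (String × List (String × String)))) (fields : List String) : Prop :=
  fields = [] ∨
  (data ≠ [] ∧ ∀ x ∈ data, (PySem.Dict.mk x).contains "attributes" = true ∧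
    ∀ f ∈ fields, (PySem.Dict.mk ((PySem.Dict.mk x).getD "attributes" [])).contains f = true)

instance (data : List (List (String × List (String × String)))) (fields : List String) : Decidable (Pre_subgrouping data fields) := by unfold Pre_subgrouping; infer_instance

def pvWitness_subgrouping : (List (List (String × List (String × String)))) × List String :=
  ([[("attributes", [("a", "1")])]], ["a"])

def Spec_subgrouping (data : List (List (String × List (String × String)))) (fields : List String) (out : List (List (String × String) × List Int)) : Prop := out = subgrouping_alt data fields
instance (data : List (List (String × List (String × String)))) (fields : List String) (out : List (List (String × String) × List Int)) : Decidable (Spec_subgrouping data fields out) := by unfold Spec_subgrouping; infer_instance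

-- ===== CLAIM (what is proved, stated in full; the proofs are below) =====
def Claim_equal_subgrouping : Prop := ∀ (data : List (List (String × List (String × String)))) (fields : List String), Dom_subgrouping data fields → Pre_subgrouping data fields → Spec_subgrouping data fields (subgrouping data fields)

-- ===== LEMMAS AND PROOFS =====

-- the (key, index) pair list both ports are about
def pvPairs (data : List (List (String × List (String × String)))) (fields : List String) : List (List (String × String) × Int) :=
  (PySem.List.enumerate data 0).map (fun p => (pvKey fields p.2, p.1))

-- the distinct keys, sorted
def pvSK (data : List (List (String × List (String × String)))) (fields : List String) : List (List (String × String)) :=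
  PySem.List.sorted (PySem.Set.ofList ((pvPairs data fields).map (·.1))) pvFlat

-- the common normal form of both ports' results
def pvTarget (data : List (List (String × List (String × String)))) (fields : List String) : List (List (String × String) × List Int) :=
  (pvSK data fields).map (fun k => (k, ((pvPairs data fields).filter (fun p => p.1 == k)).map (·.2)))

-- sorted/sorted2 only read `decide (· < ·)`: they do not depend on which (defeq) LT/Decidable
-- instances elaboration picked
lemma bridge_sorted {a k : Type} (i1 i2 : LT k) (d1 : @DecidableLT k i1) (d2 : @DecidableLT k i2)
    (hP : ∀ x y : k, (@LT.lt k i1 x y) = (@LT.lt k i2 x y)) (xs : List a) (key : a → k) :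
    @PySem.List.sorted a k i1 d1 xs key false = @PySem.List.sorted a k i2 d2 xs key false := by
  rw [@PySem.List.sorted_eq_foldl_insertBy a k i1 d1 xs key,
      @PySem.List.sorted_eq_foldl_insertBy a k i2 d2 xs key]
  have hbe : (fun (p q : a) => @decide _ (d1 (key p) (key q)))
      = (fun (p q : a) => @decide _ (d2 (key p) (key q))) := by
    funext p q
    exact decide_eq_decide.mpr (iff_of_eq (hP (key p) (key q)))
  rw [hbe]

lemma bridge_sorted2 {a k1 k2 : Type} (i1 i1' : LT k1) (i2 i2' : LT k2)
    (d1 : @DecidableLT k1 i1) (d1' : @DecidableLT k1 i1')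
    (d2 : @DecidableLT k2 i2) (d2' : @DecidableLT k2 i2')
    (hP1 : ∀ x y : k1, (@LT.lt k1 i1 x y) = (@LT.lt k1 i1' x y))
    (hP2 : ∀ x y : k2, (@LT.lt k2 i2 x y) = (@LT.lt k2 i2' x y))
    (xs : List a) (f1 : a → k1) (f2 : a → k2) :
    @PySem.List.sorted2 a k1 k2 i1 d1 i2 d2 xs f1 f2 false
    = @PySem.List.sorted2 a k1 k2 i1' d1' i2' d2' xs f1 f2 false := by
  simp only [PySem.List.sorted2, if_neg (by decide : ¬ (false = true))]
  have hbe : (fun (p q : a) => @decide _ (d1 (f1 p) (f1 q))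
        || (!(@decide _ (d1 (f1 q) (f1 p))) && @decide _ (d2 (f2 p) (f2 q))))
      = (fun (p q : a) => @decide _ (d1' (f1 p) (f1 q))
        || (!(@decide _ (d1' (f1 q) (f1 p))) && @decide _ (d2' (f2 p) (f2 q)))) := by
    funext p q
    rw [decide_eq_decide.mpr (iff_of_eq (hP1 (f1 p) (f1 q))),
        decide_eq_decide.mpr (iff_of_eq (hP1 (f1 q) (f1 p))),
        decide_eq_decide.mpr (iff_of_eq (hP2 (f2 p) (f2 q)))]
  rw [hbe]

lemma pvFlat_inj : Function.Injective pvFlat := by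
  intro a b h
  induction a generalizing b with
  | nil => cases b with
    | nil => rfl
    | cons q t => simp [pvFlat] at h
  | cons q t ih =>
    cases b with
    | nil => simp [pvFlat] at h
    | cons q' t' =>
      simp only [pvFlat, List.flatMap_cons] at h
      obtain ⟨h1, h2, h3⟩ := by simpa using h
      have := ih (b := t') (by simpa [pvFlat] using h3)
      simp [Prod.ext_iff, h1, h2, this]

lemma pvSK_nodup (data : List (List (String × List (String × String)))) (fields : List String) :
    (pvSK data fields).Nodup :=
  (PySem.List.sorted_perm _ _ _).nodup_iff.mpr (PySem.Set.nodup_ofList _)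

lemma pvSK_pairwise (data : List (List (String × List (String × String)))) (fields : List String) :
    (pvSK data fields).Pairwise (fun a b => pvFlat a < pvFlat b) := by
  unfold pvSK
  rw [bridge_sorted List.instLT List.instLinearOrder.toLT
    (fun (x y : List String) => x.decidableLT y) LinearOrder.toDecidableLT (fun x y => rfl)
    (PySem.Set.ofList ((pvPairs data fields).map (·.1))) pvFlat]
  have hle := PySem.List.sorted_pairwise (PySem.Set.ofList ((pvPairs data fields).map (·.1))) pvFlat
  have hne : (@PySem.List.sorted _ _ List.instLinearOrder.toLT LinearOrder.toDecidableLT (PySem.Set.ofList ((pvPairs data fields).map (·.1))) pvFlat false).Pairwise (· ≠ ·) :=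
    (@PySem.List.sorted_perm _ _ List.instLinearOrder.toLT LinearOrder.toDecidableLT _ _ _).nodup_iff.mpr (PySem.Set.nodup_ofList _)
  exact (hle.and hne).imp (fun h => lt_of_le_of_ne h.1 (fun he => absurd (pvFlat_inj he) h.2))

lemma pvPairs_mem_fst (data : List (List (String × List (String × String)))) (fields : List String)
    (p : List (String × String) × Int) (hp : p ∈ pvPairs data fields) : p.1 ∈ pvSK data fields := by
  unfold pvSK
  rw [PySem.List.mem_sorted, PySem.Set.mem_ofList]
  exact List.mem_map_of_mem hp

lemma pvPairs_snd_lt (data : List (List (String × List (String × String)))) (fields : List String) :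
    (pvPairs data fields).Pairwise (fun p q => p.2 < q.2) := by
  unfold pvPairs
  rw [List.pairwise_map]
  have h := PySem.List.pairwise_lt_pyRange_one 0 (0 + (data.length : Int))
  rw [← PySem.List.map_fst_enumerate data 0] at h
  exact List.pairwise_map.mp h

-- characterisation of A's defaultdict loop
lemma dict_items (data : List (List (String × List (String × String)))) (fields : List String) :
    ((PySem.List.enumerate data 0).foldl
      (fun d p => d.modify (pvKey fields p.2) [] (fun l => l ++ [p.1])) PySem.Dict.empty).items
    = (PySem.Set.ofList ((pvPairs data fields).map (·.1))).map
        (fun k => (k, ((pvPairs data fields).filter (fun p => p.1 == k)).map (·.2))) := by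
  have hres : (PySem.List.enumerate data 0).foldl
      (fun d p => d.modify (pvKey fields p.2) [] (fun l => l ++ [p.1])) PySem.Dict.empty
      = (pvPairs data fields).foldl
      (fun d q => d.modify q.1 [] (fun l => l ++ [q.2])) PySem.Dict.empty := by
    unfold pvPairs; rw [List.foldl_map]
  rw [hres]
  have hkeys := PySem.Dict.keys_foldl_modify_key (pvPairs data fields) (fun q => q.1) []
    (fun _ q => fun l => l ++ [q.2]) PySem.Dict.empty
  have hnd := PySem.Dict.nodup_keys_foldl_modify_key (pvPairs data fields) (fun q => q.1) []
    (fun _ q => fun l => l ++ [q.2]) PySem.Dict.empty (by simp)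
  rw [PySem.Dict.items_eq_map_keys _ hnd []]
  rw [hkeys]
  have hupd : PySem.Set.update (PySem.Dict.empty : PySem.Dict (List (String × String)) (List Int)).keys
      ((pvPairs data fields).map (fun q => q.1)) = PySem.Set.ofList ((pvPairs data fields).map (·.1)) := by
    simp [PySem.Set.update, PySem.Set.ofList, PySem.Dict.keys_empty]
  rw [hupd]
  apply List.map_congr_left
  intro k _
  rw [PySem.Dict.getD_foldl_modify_append]
  simp

lemma subgrouping_eq_target (data : List (List (String × List (String × String)))) (fields : List String) :
    subgrouping data fields = pvTarget data fields := by
  show PySem.List.sorted _ (fun (q : List (String × String) × List Int) => pvFlat q.1) = _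
  rw [dict_items]
  rw [bridge_sorted List.instLT List.instLinearOrder.toLT
    (fun (x y : List String) => x.decidableLT y) LinearOrder.toDecidableLT (fun x y => rfl) _
    (fun (q : List (String × String) × List Int) => pvFlat q.1)]
  apply PySem.List.sorted_eq_of_perm_of_pairwise_lt
  · unfold pvTarget pvSK
    exact List.Perm.map _ (PySem.List.sorted_perm _ _ _)
  · unfold pvTarget
    rw [List.pairwise_map]
    exact (pvSK_pairwise data fields).imp (fun h => h)

-- any fixed-Decidable sorted2 is the sort by the lexicographic pair key
lemma sorted2_eq_sorted_lex {a k1 k2 : Type} [LinearOrder k1] [LinearOrder k2]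
    (xs : List a) (f1 : a → k1) (f2 : a → k2) :
    PySem.List.sorted2 xs f1 f2 = PySem.List.sorted xs (fun x => toLex (f1 x, f2 x)) := by
  rw [PySem.List.sorted_eq_foldl_insertBy]
  show List.foldl (fun acc x => PySem.List.insertBy
      (fun p q => decide (f1 p < f1 q) || (!decide (f1 q < f1 p) && decide (f2 p < f2 q))) x acc) [] xs = _
  have hbe : (fun (p q : a) => decide (f1 p < f1 q) || (!decide (f1 q < f1 p) && decide (f2 p < f2 q)))
      = (fun p q => decide (toLex (f1 p, f2 p) < toLex (f1 q, f2 q))) := by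
    funext p q
    by_cases h1 : f1 p < f1 q
    · simp [h1, Prod.Lex.lt_iff]
    · by_cases h2 : f1 q < f1 p
      · simp [Prod.Lex.lt_iff, h1, h2, ne_of_gt h2]
      · have he : f1 p = f1 q := le_antisymm (not_lt.mp h2) (not_lt.mp h1)
        simp [Prod.Lex.lt_iff, he]
  rw [hbe]

-- distinct covering keys: concatenating the filtered runs is a permutation of the list
lemma flatMap_filter_perm {K I : Type} [BEq K] [LawfulBEq K] :
    ∀ (keys : List K) (ks : List (K × I)), keys.Nodup → (∀ p ∈ ks, p.1 ∈ keys) →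
    (keys.flatMap (fun k => ks.filter (fun p => p.1 == k))).Perm ks := by
  intro keys
  induction keys with
  | nil =>
    intro ks _ hcov
    cases ks with
    | nil => simp
    | cons p t => exact absurd (hcov p (by simp)) (by simp)
  | cons k kt ih =>
    intro ks hnd hcov
    rw [List.flatMap_cons]
    have hsub : kt.flatMap (fun k' => ks.filter (fun p => p.1 == k'))
        = kt.flatMap (fun k' => (ks.filter (fun p => !(p.1 == k))).filter (fun p => p.1 == k')) := by
      apply List.flatMap_congr
      intro k' hk'
      rw [List.filter_filter]
      apply List.filter_congr
      intro p _
      by_cases hp : p.1 = k'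
      · have hkk : k' ≠ k := fun he => (List.nodup_cons.mp hnd).1 (he ▸ hk')
        simp [hp, hkk]
      · simp [hp]
    rw [hsub]
    have hcov' : ∀ p ∈ ks.filter (fun p => !(p.1 == k)), p.1 ∈ kt := by
      intro p hp
      have h1 := List.of_mem_filter hp
      have h2 := hcov p (List.mem_of_mem_filter hp)
      simp at h1
      rcases List.mem_cons.mp h2 with h | h
      · exact absurd h h1
      · exact h
    have hperm := ih (ks.filter (fun p => !(p.1 == k))) (List.nodup_cons.mp hnd).2 hcov'
    exact (hperm.append_left (ks.filter (fun p => p.1 == k))).trans (List.filter_append_perm _ ks)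

-- the stable sort of the pair list is the sorted keys' runs, concatenated
lemma sorted_pairs_eq (data : List (List (String × List (String × String)))) (fields : List String) :
    PySem.List.sorted2 (pvPairs data fields) (fun q => pvFlat q.1) (fun q => q.2)
    = (pvSK data fields).flatMap (fun k => (pvPairs data fields).filter (fun p => p.1 == k)) := by
  rw [bridge_sorted2 List.instLT List.instLinearOrder.toLT Int.instLTInt Int.instLinearOrder.toLT
    (fun (x y : List String) => x.decidableLT y) LinearOrder.toDecidableLT
    (fun (x y : Int) => Int.decLt x y) LinearOrder.toDecidableLT
    (fun x y => rfl) (fun x y => rfl) (pvPairs data fields) (fun q => pvFlat q.1) (fun q => q.2)]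
  rw [sorted2_eq_sorted_lex]
  apply PySem.List.sorted_eq_of_perm_of_pairwise_lt
  · exact flatMap_filter_perm (pvSK data fields) (pvPairs data fields) (pvSK_nodup data fields)
      (pvPairs_mem_fst data fields)
  · rw [List.pairwise_flatMap]
    constructor
    · intro k _
      have hp : ((pvPairs data fields).filter (fun p => p.1 == k)).Pairwise (fun p q => p.2 < q.2) :=
        (pvPairs_snd_lt data fields).sublist List.filter_sublist
      apply hp.imp_of_mem
      intro p q hpm hqm hlt
      have hpk : p.1 = k := by simpa using (List.of_mem_filter hpm)
      have hqk : q.1 = k := by simpa using (List.of_mem_filter hqm)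
      rw [Prod.Lex.lt_iff]
      right
      exact ⟨by simp [hpk, hqk], hlt⟩
    · apply (pvSK_pairwise data fields).imp
      intro k1 k2 hlt p hpm q hqm
      have hpk : p.1 = k1 := by simpa using (List.of_mem_filter hpm)
      have hqk : q.1 = k2 := by simpa using (List.of_mem_filter hqm)
      rw [Prod.Lex.lt_iff]
      left
      simp only [ofLex_toLex]
      rw [hpk, hqk]
      exact hlt

-- Source B's run-detection scan over one run of equal keys
lemma scan_run : ∀ (l : List (List (String × String) × Int)) (k : List (String × String))
    (g : List Int) (acc : List (List (String × String) × List Int)), (∀ p ∈ l, p.1 = k) →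
    l.foldl pvGroupStep ((k, g) :: acc) = (k, g ++ l.map (·.2)) :: acc := by
  intro l
  induction l with
  | nil => intro k g acc _; simp
  | cons p t ih =>
    intro k g acc hall
    have hpk : p.1 = k := hall p (by simp)
    rw [List.foldl_cons]
    have hstep : pvGroupStep ((k, g) :: acc) p = (k, g ++ [p.2]) :: acc := by
      simp [pvGroupStep, hpk]
    rw [hstep, ih k (g ++ [p.2]) acc (fun q hq => hall q (by simp [hq]))]
    simp

-- Source B's scan over the concatenation of nonempty runs with distinct keys
lemma scan_flatMap : ∀ (keys : List (List (String × String)))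
    (f : List (String × String) → List (List (String × String) × Int)), keys.Nodup →
    (∀ k ∈ keys, f k ≠ [] ∧ ∀ p ∈ f k, p.1 = k) →
    ∀ (acc : List (List (String × String) × List Int)), (∀ k ∈ keys, ∀ p ∈ acc.head?, p.1 ≠ k) →
    (keys.flatMap f).foldl pvGroupStep acc
    = (keys.map (fun k => (k, (f k).map (·.2)))).reverse ++ acc := by
  intro keys
  induction keys with
  | nil => intro f _ _ acc _; simp
  | cons k kt ih =>
    intro f hnd hf acc hhead
    obtain ⟨p, l, hfl⟩ := List.exists_cons_of_ne_nil (hf k (by simp)).1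
    have hall := (hf k (by simp)).2
    have hpk : p.1 = k := hall p (by rw [hfl]; simp)
    rw [List.flatMap_cons, List.foldl_append, hfl, List.foldl_cons]
    have hstep : pvGroupStep acc p = (k, [p.2]) :: acc := by
      cases acc with
      | nil => simp [pvGroupStep, hpk]
      | cons a rest =>
        obtain ⟨a1, a2⟩ := a
        have hne : a1 ≠ k := hhead k (by simp) (a1, a2) (by simp)
        simp [pvGroupStep, hpk, hne]
    rw [hstep, scan_run l k [p.2] acc (fun q hq => hall q (by rw [hfl]; simp [hq]))]
    have hrest := ih f (List.nodup_cons.mp hnd).2 (fun k' hk' => hf k' (by simp [hk']))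
      ((k, [p.2] ++ l.map (·.2)) :: acc)
      (by
        intro k' hk' q hq
        have hq' : q = (k, [p.2] ++ l.map (·.2)) := by simpa using hq.symm
        rw [hq']
        intro he
        have hke : k = k' := by simpa using he
        exact (List.nodup_cons.mp hnd).1 (hke ▸ hk'))
    rw [hrest]
    simp [hfl]

lemma subgrouping_alt_eq_target (data : List (List (String × List (String × String)))) (fields : List String) :
    subgrouping_alt data fields = pvTarget data fields := by
  show (List.foldl pvGroupStep []
    (PySem.List.sorted2 (pvPairs data fields) (fun q => pvFlat q.1) (fun q => q.2))).reverse = _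
  rw [sorted_pairs_eq]
  rw [scan_flatMap (pvSK data fields) _ (pvSK_nodup data fields)
    (by
      intro k hk
      constructor
      · have hk' : k ∈ (pvPairs data fields).map (·.1) := by
          have := hk
          unfold pvSK at this
          rw [PySem.List.mem_sorted, PySem.Set.mem_ofList] at this
          exact this
        obtain ⟨p, hp, hpk⟩ := List.mem_map.mp hk'
        intro hnil
        have : p ∈ (pvPairs data fields).filter (fun q => q.1 == k) :=
          List.mem_filter.mpr ⟨hp, by simp [hpk]⟩
        rw [hnil] at this
        exact absurd this (List.not_mem_nil)
      · intro p hp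
        simpa using List.of_mem_filter hp)
    [] (by intro k _ p hp; simp at hp)]
  simp [pvTarget]

-- ===== VERDICT (by name: the statement is the Claim_ definition above) =====
theorem subgrouping_spec : Claim_equal_subgrouping := by
  intro data fields _ _
  unfold Spec_subgrouping
  rw [subgrouping_eq_target, subgrouping_alt_eq_target]
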